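-- pv_equiv track=rewrite | github.com/daniel-demian/relational-language-translator | src/RaOptimize.py | findSelect
-- ===== SOURCE A (Python) =====
-- def findSelect(text, table):
--     pom = ""
--     for i in range(0, len(text)):
--         if text[i] == "(":
--             break
--         if text[i].find(table, 0, len(table)) >= 0:
--             pom += text[i] + " "
--             pass
--     if pom == "":
--         pom = None
--         return pom
--     else:
--         return pom
-- ===== SOURCE B (Python) =====
-- def findSelect(text, table):
--     # Reverse traversal with reset: scan from the right, prepending matches;
--     # on "(" discard everything accumulated so far (it lies after the first "(").
--     pom = ""
--     for w in reversed(text):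
--         if w == "(":
--             pom = ""
--         elif w.startswith(table):
--             pom = w + " " + pom
--     return pom if pom else None
-- ===== Notes on version B (the rewrite author's own statement) =====
-- stated objective: alternative
-- what changed: Replaces A's forward break-loop that appends matches by a reverse traversal that builds the result back-to-front by prepending and resets the accumulator on every "(" (discarding everything after the first "(") instead of breaking.
import Mathlib
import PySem

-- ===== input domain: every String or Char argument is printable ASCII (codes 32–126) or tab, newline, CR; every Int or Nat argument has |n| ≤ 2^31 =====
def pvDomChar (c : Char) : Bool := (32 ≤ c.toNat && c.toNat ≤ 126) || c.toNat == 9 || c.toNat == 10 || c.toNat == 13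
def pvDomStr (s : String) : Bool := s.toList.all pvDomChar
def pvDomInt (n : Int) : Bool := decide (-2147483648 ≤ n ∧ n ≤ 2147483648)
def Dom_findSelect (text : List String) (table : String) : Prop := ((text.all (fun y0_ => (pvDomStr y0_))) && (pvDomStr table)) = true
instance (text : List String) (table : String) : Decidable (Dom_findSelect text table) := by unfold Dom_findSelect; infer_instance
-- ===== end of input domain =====

-- B replaces A's forward break-loop by a reverse traversal that builds the result
-- back-to-front and resets the accumulator on "("; same return value on all inputs (A is total).

-- ===== PORT A =====
-- A's for-loop with `break`, accumulating pom (as its list of chars)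
def findSelectLoop (table : String) (text : List String) (pom : List Char) : List Char :=
  match text with
  | [] => pom
  | w :: rest =>
    if w = "(" then pom
    else if 0 ≤ PySem.Str.findFrom w table 0 (some (PySem.Str.len table)) then
      findSelectLoop table rest (pom ++ w.toList ++ [' '])
    else findSelectLoop table rest pom

def findSelect (text : List String) (table : String) : Option String :=
  let pom := findSelectLoop table text []
  if pom = [] then none else some (String.ofList pom)

-- ===== PORT B =====
-- `for w in reversed(text)` with prepend/reset = foldr over text (pom as its list of chars)
def findSelect_alt (text : List String) (table : String) : Option String :=
  let pom := text.foldr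
    (fun w acc =>
      if w = "(" then []
      else if PySem.Str.startswith w table then w.toList ++ [' '] ++ acc
      else acc) ([] : List Char)
  if pom = [] then none else some (String.ofList pom)

-- ===== PRECONDITION & SPEC =====
def Spec_findSelect (text : List String) (table : String) (out : Option String) : Prop := out = findSelect_alt text table
instance (text : List String) (table : String) (out : Option String) : Decidable (Spec_findSelect text table out) := by unfold Spec_findSelect; infer_instance

-- ===== CLAIM (what is proved, stated in full; the proofs are below) =====
def Claim_equal_findSelect : Prop := ∀ (text : List String) (table : String), Dom_findSelect text table → Spec_findSelect text table (findSelect text table)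

-- ===== LEMMAS AND PROOFS =====

-- a list that is an infix of the first |sub| elements of s is exactly a prefix of s
theorem infix_take_iff (sub s : List Char) : sub <:+: s.take sub.length ↔ sub <+: s := by
  constructor
  · intro h
    obtain ⟨l, r, hl⟩ := h
    have hlen : (l ++ sub ++ r).length = (s.take sub.length).length := by rw [hl]
    have hmin := min_le_left sub.length s.length
    simp only [List.length_append, List.length_take] at hlen
    have hl0 : l = [] := by
      cases l with
      | nil => rfl
      | cons a t => exfalso; simp only [List.length_cons] at hlen; omega
    have hr0 : r = [] := by
      cases r with
      | nil => rfl
      | cons a t => exfalso; simp only [List.length_cons] at hlen; omega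
    subst hl0; subst hr0
    simp at hl
    rw [List.prefix_iff_eq_take]
    exact hl
  · intro h
    have := List.prefix_iff_eq_take.mp h
    rw [← this]

theorem chars_findFrom_iff (s sub : List Char) :
    (0 ≤ PySem.Chars.findFrom s sub 0 (some (sub.length : Int))) ↔
    PySem.Chars.find (List.take sub.length s) sub ≠ -1 := by
  unfold PySem.Chars.findFrom
  set E : Int := (if (s.length : Int) < (sub.length : Int) then (s.length : Int) else (sub.length : Int)) with hE
  have hEnn : 0 ≤ E := by rw [hE]; split_ifs <;> omega
  have htake : List.take E.toNat s = List.take sub.length s := by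
    rw [hE]; split_ifs with h
    · rw [Int.toNat_natCast, List.take_length, List.take_of_length_le (by exact_mod_cast h.le)]
    · rw [Int.toNat_natCast]
  simp only [show ¬((sub.length : Int) < 0) from by omega, if_false,
    show ¬((0 : Int) < 0) from by omega, ← hE]
  simp only [show ¬(E < 0) from by omega, if_false, Int.toNat_zero, List.drop_zero, htake]
  by_cases hf : PySem.Chars.find (List.take sub.length s) sub = -1
  · simp [hf]
  · have := PySem.Chars.neg_one_le_find (List.take sub.length s) sub
    simp only [hf, if_false, zero_add]
    constructor
    · intro _; exact hf
    · intro _; omega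

-- A's test `w.find(table, 0, len(table)) >= 0` is exactly `w.startswith(table)`
theorem findFrom_bounded_eq_startswith (w table : String) :
    (0 ≤ PySem.Str.findFrom w table 0 (some (PySem.Str.len table))) ↔
    PySem.Str.startswith w table = true := by
  simp only [PySem.Str.findFrom_eq, PySem.Str.len_eq, PySem.Str.startswith_eq]
  rw [PySem.Chars.startswith_iff, ← infix_take_iff table.toList w.toList,
    ← PySem.Chars.find_ne_neg_one_iff]
  exact chars_findFrom_iff w.toList table.toList

-- both the forward break-loop and the backward reset-fold compute the
-- filter-map-flatten of the prefix before the first "("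
theorem loop_eq (table : String) (text : List String) (pom : List Char) :
    findSelectLoop table text pom =
      pom ++ (((text.takeWhile (fun w => w ≠ "(")).filter
        (fun w => PySem.Str.startswith w table)).map (fun w => w.toList ++ [' '])).flatten := by
  induction text generalizing pom with
  | nil => simp [findSelectLoop]
  | cons w rest ih =>
    unfold findSelectLoop
    by_cases hw : w = "("
    · simp [hw, List.takeWhile_cons_of_neg]
    · rw [if_neg hw, List.takeWhile_cons_of_pos (by simp [hw])]
      by_cases hs : PySem.Str.startswith w table = true
      · rw [if_pos ((findFrom_bounded_eq_startswith w table).mpr hs), ih]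
        rw [PySem.Str.startswith_eq] at hs
        simp [hs]
      · rw [if_neg (fun hc => hs ((findFrom_bounded_eq_startswith w table).mp hc)), ih]
        rw [PySem.Str.startswith_eq] at hs
        simp [hs]

theorem foldr_eq (table : String) (text : List String) :
    text.foldr
      (fun w acc =>
        if w = "(" then []
        else if PySem.Str.startswith w table then w.toList ++ [' '] ++ acc
        else acc) ([] : List Char) =
      (((text.takeWhile (fun w => w ≠ "(")).filter
        (fun w => PySem.Str.startswith w table)).map (fun w => w.toList ++ [' '])).flatten := by
  induction text with
  | nil => simp
  | cons w rest ih =>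
    by_cases hw : w = "("
    · simp [hw, List.takeWhile_cons_of_neg]
    · rw [List.foldr_cons, ih, List.takeWhile_cons_of_pos (by simp [hw]), if_neg hw]
      by_cases hs : PySem.Str.startswith w table = true <;>
        rw [PySem.Str.startswith_eq] at hs <;> simp [hs]

-- ===== VERDICT (by name: the statement is the Claim_ definition above) =====
theorem findSelect_spec : Claim_equal_findSelect := by
  intro text table _
  unfold Spec_findSelect findSelect findSelect_alt
  rw [loop_eq, foldr_eq]
  simp
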